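-- pv_equiv track=rewrite | github.com/fearKarma/projectOiler | Python/problem 42.py | GetAlphaSum
-- ===== SOURCE A (Python) =====
-- def TriangleNumberList():
-- 	upper_limit = 26 * 26
-- 	list_tri = []
-- 	for i in range(1,upper_limit):
-- 		test = i * (i + 1) / 2
-- 		list_tri.append(int(test))
-- 	return list_tri
--
-- def GetAlphaSum(n):
-- 	alphaValue = ['"',"A","B","C","D","E","F","G","H","I","J","K","L","M","N","O","P","Q","R","S","T","U","V","W","X","Y","Z"]
-- 	tnums = TriangleNumberList()
-- 	tWords = 0
-- 	for i in n:
-- 		tWords += alphaValue.index(i)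
-- 	if (tWords in tnums):
-- 		return True
-- 	else:
-- 		return False
-- ===== SOURCE B (Python) =====
-- def GetAlphaSum(n):
--     t = 0
--     for c in n:
--         t += 0 if c == '"' else ord(c) - 64
--     # binary search for the largest lo in [0, 675] with lo*(lo+1)//2 <= t
--     lo, hi = 0, 676
--     while hi - lo > 1:
--         mid = (lo + hi) // 2
--         if mid * (mid + 1) // 2 <= t:
--             lo = mid
--         else:
--             hi = mid
--     return lo >= 1 and lo * (lo + 1) // 2 == t
-- ===== Notes on version B (the rewrite author's own statement) =====
-- stated objective: alternative
-- what changed: B replaces A's build-a-675-element-triangle-number-list-plus-membership-scan and per-character list.index alphabet scan with a direct ord()-based letter value and a binary search for the triangle index over the same range [1,675].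
import Mathlib
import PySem

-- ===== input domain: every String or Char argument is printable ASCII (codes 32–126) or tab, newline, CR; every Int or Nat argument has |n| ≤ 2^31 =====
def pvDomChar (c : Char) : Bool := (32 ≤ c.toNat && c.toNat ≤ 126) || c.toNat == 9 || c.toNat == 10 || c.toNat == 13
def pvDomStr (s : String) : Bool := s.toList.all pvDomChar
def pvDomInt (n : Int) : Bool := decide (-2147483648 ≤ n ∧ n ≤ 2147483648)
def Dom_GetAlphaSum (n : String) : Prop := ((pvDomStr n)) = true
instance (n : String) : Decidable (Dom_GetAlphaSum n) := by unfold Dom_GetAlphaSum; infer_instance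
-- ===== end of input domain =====

-- B replaces A's triangle-number list + membership scan (and per-char alphabet scan) by an
-- ord()-based letter value and a binary search over the same range; return value only, no side effects.

-- ===== PORT A =====
-- int(i*(i+1)/2): the float division is exact for i < 676, so it equals floor division.
def TriangleNumberList : List Int :=
  (PySem.List.pyRange 1 (26 * 26) 1).foldl
    (fun l i => l ++ [PySem.Int.floordiv (i * (i + 1)) 2]) []

def alphaValue : List String :=
  ["\"","A","B","C","D","E","F","G","H","I","J","K","L","M",
   "N","O","P","Q","R","S","T","U","V","W","X","Y","Z"]

-- the accumulation loop: alphaValue.index raises ValueError (none) on a char not in the list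
def sumIdxA : List Char → Int → Option Int
  | [], acc => some acc
  | c :: cs, acc =>
    match PySem.List.index? alphaValue (String.ofList [c]) with
    | none => none
    | some k => sumIdxA cs (acc + (k : Int))

def GetAlphaSum (n : String) : Bool :=
  match sumIdxA n.toList 0 with
  | none => false   -- Python raises ValueError here; excluded by Pre_GetAlphaSum
  | some tWords => if tWords ∈ TriangleNumberList then true else false

-- ===== PORT B =====
def pvLetter (c : Char) : Int := if c == '"' then 0 else (c.toNat : Int) - 64

def pvBsearch (t lo hi : Int) : Int :=
  if _h : hi - lo > 1 then
    let mid := PySem.Int.floordiv (lo + hi) 2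
    if PySem.Int.floordiv (mid * (mid + 1)) 2 ≤ t then pvBsearch t mid hi
    else pvBsearch t lo mid
  else lo
termination_by (hi - lo).toNat
decreasing_by
  all_goals
    simp only [mid, PySem.Int.floordiv_eq_ediv_of_pos (a := lo + hi) (by omega : (0:Int) < 2)] at *
    omega

def GetAlphaSum_alt (n : String) : Bool :=
  let t := n.toList.foldl (fun t c => t + pvLetter c) 0
  let lo := pvBsearch t 0 676
  decide (lo ≥ 1 ∧ PySem.Int.floordiv (lo * (lo + 1)) 2 = t)

-- ===== PRECONDITION & SPEC =====
-- Pre_ excludes exactly the strings containing a character other than '"' or 'A'..'Z',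
-- on which A's alphaValue.index(i) raises ValueError.
def Pre_GetAlphaSum (n : String) : Prop :=
  (n.toList.all (fun c => c == '"' || ('A' ≤ c && c ≤ 'Z'))) = true
instance (n : String) : Decidable (Pre_GetAlphaSum n) := by unfold Pre_GetAlphaSum; infer_instance

def pvWitness_GetAlphaSum : String := "SKY"

def Spec_GetAlphaSum (n : String) (out : Bool) : Prop := out = GetAlphaSum_alt n
instance (n : String) (out : Bool) : Decidable (Spec_GetAlphaSum n out) := by unfold Spec_GetAlphaSum; infer_instance

-- ===== CLAIM (what is proved, stated in full; the proofs are below) =====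
def Claim_equal_GetAlphaSum : Prop :=
  ∀ (n : String), Dom_GetAlphaSum n → Pre_GetAlphaSum n → Spec_GetAlphaSum n (GetAlphaSum n)

-- ===== LEMMAS AND PROOFS =====

theorem pre_chars (n : String) (h : Pre_GetAlphaSum n) :
    ∀ c ∈ n.toList, c = '"' ∨ ('A' ≤ c ∧ c ≤ 'Z') := by
  unfold Pre_GetAlphaSum at h
  rw [List.all_eq_true] at h
  intro c hc
  have hx := h c hc
  simp only [Bool.or_eq_true, beq_iff_eq, Bool.and_eq_true, decide_eq_true_eq] at hx
  exact hx

-- f i = i*(i+1)//2, the triangle number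
def pvTri (i : Int) : Int := PySem.Int.floordiv (i * (i + 1)) 2

theorem tri_two_mul (i : Int) : 2 * pvTri i = i * (i + 1) := by
  unfold pvTri
  rw [PySem.Int.floordiv_eq_ediv_of_pos (by omega : (0:Int) < 2)]
  have h : (2:Int) ∣ i * (i + 1) := (Int.even_mul_succ_self i).two_dvd
  omega

theorem tri_le_iff {r i : Int} (hr : 0 ≤ r) (hi : 0 ≤ i) : pvTri r ≤ pvTri i ↔ r ≤ i := by
  constructor
  · intro h
    have h2 : r * (r + 1) ≤ i * (i + 1) := by
      have := tri_two_mul r; have := tri_two_mul i; omega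
    nlinarith
  · intro h
    have h2 : r * (r + 1) ≤ i * (i + 1) := by nlinarith
    have := tri_two_mul r; have := tri_two_mul i; omega

theorem foldl_append_map (xs : List Int) (f : Int → Int) (acc : List Int) :
    xs.foldl (fun l i => l ++ [f i]) acc = acc ++ xs.map f := by
  induction xs generalizing acc with
  | nil => simp
  | cons x xs ih => simp [List.foldl, ih]

theorem mem_TriangleNumberList (t : Int) :
    t ∈ TriangleNumberList ↔ ∃ i : Int, 1 ≤ i ∧ i < 676 ∧ t = pvTri i := by
  unfold TriangleNumberList
  rw [foldl_append_map]
  simp only [List.nil_append, List.mem_map, PySem.List.mem_pyRange_one]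
  constructor
  · rintro ⟨i, ⟨h1, h2⟩, h3⟩
    exact ⟨i, h1, by norm_num at h2; omega, by rw [← h3]; rfl⟩
  · rintro ⟨i, h1, h2, h3⟩
    exact ⟨i, ⟨h1, by norm_num; omega⟩, by rw [h3]; rfl⟩

theorem bsearch_spec (t : Int) : ∀ lo hi : Int, lo < hi → hi ≤ 676 → pvTri lo ≤ t →
    (hi = 676 ∨ t < pvTri hi) →
    lo ≤ pvBsearch t lo hi ∧ pvBsearch t lo hi < hi ∧ pvTri (pvBsearch t lo hi) ≤ t ∧
      (pvBsearch t lo hi + 1 = 676 ∨ t < pvTri (pvBsearch t lo hi + 1)) := by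
  intro lo hi
  induction lo, hi using pvBsearch.induct (t := t) with
  | case1 lo hi h mid htest ih =>
    intro h1 h2 h3 h4
    have hmdef : mid = PySem.Int.floordiv (lo + hi) 2 := rfl
    have hmid : lo < mid ∧ mid < hi := by
      rw [hmdef, PySem.Int.floordiv_eq_ediv_of_pos (by omega : (0:Int) < 2)]
      omega
    have htest' : PySem.Int.floordiv (PySem.Int.floordiv (lo + hi) 2 *
        (PySem.Int.floordiv (lo + hi) 2 + 1)) 2 ≤ t := htest
    rw [pvBsearch, dif_pos h]
    simp only [if_pos htest']
    rw [← hmdef]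
    exact (ih hmid.2 h2 htest h4).imp (by omega) id
  | case2 lo hi h mid htest ih =>
    intro h1 h2 h3 h4
    have hmdef : mid = PySem.Int.floordiv (lo + hi) 2 := rfl
    have hmid : lo < mid ∧ mid < hi := by
      rw [hmdef, PySem.Int.floordiv_eq_ediv_of_pos (by omega : (0:Int) < 2)]
      omega
    have htest' : ¬ PySem.Int.floordiv (PySem.Int.floordiv (lo + hi) 2 *
        (PySem.Int.floordiv (lo + hi) 2 + 1)) 2 ≤ t := htest
    rw [pvBsearch, dif_pos h]
    simp only [if_neg htest']
    rw [← hmdef]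
    exact (ih hmid.1 (by omega) h3 (Or.inr (lt_of_not_ge htest))).imp id
        (fun hc => ⟨by omega, hc.2.1, hc.2.2⟩)
  | case3 lo hi h =>
    intro h1 h2 h3 h4
    rw [pvBsearch, dif_neg h]
    have hhi : hi = lo + 1 := by omega
    exact ⟨le_refl _, by omega, h3, hhi ▸ h4⟩

theorem letter_index (c : Char) (hc : c = '"' ∨ ('A' ≤ c ∧ c ≤ 'Z')) :
    PySem.List.index? alphaValue (String.ofList [c]) = some (pvLetter c).toNat ∧ 0 ≤ pvLetter c := by
  rcases hc with h | ⟨h1, h2⟩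
  · subst h; constructor <;> decide
  · have hk1 : 65 ≤ c.toNat := h1
    have hk2 : c.toNat ≤ 90 := h2
    have hc : c = Char.ofNat c.toNat := (Char.ofNat_toNat c).symm
    rw [hc]
    generalize c.toNat = k at hk1 hk2 ⊢
    interval_cases k <;> exact ⟨by decide, by decide⟩

-- A's accumulated index sum equals B's foldl of letter values, under Pre_
theorem sumIdx_eq (cs : List Char) (hcs : ∀ c ∈ cs, c = '"' ∨ ('A' ≤ c ∧ c ≤ 'Z')) :
    ∀ acc : Int, sumIdxA cs acc = some (cs.foldl (fun t c => t + pvLetter c) acc) := by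
  induction cs with
  | nil => intro acc; rfl
  | cons c cs ih =>
    intro acc
    have h := letter_index c (hcs c (by simp))
    simp only [sumIdxA, h.1, List.foldl]
    rw [Int.toNat_of_nonneg h.2]
    exact ih (fun d hd => hcs d (by simp [hd])) _

theorem sum_nonneg (cs : List Char) (hcs : ∀ c ∈ cs, c = '"' ∨ ('A' ≤ c ∧ c ≤ 'Z')) :
    ∀ acc : Int, 0 ≤ acc → 0 ≤ cs.foldl (fun t c => t + pvLetter c) acc := by
  induction cs with
  | nil => intro acc h; exact h
  | cons c cs ih =>
    intro acc h
    have hl := (letter_index c (hcs c (by simp))).2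
    simp only [List.foldl]
    exact ih (fun d hd => hcs d (by simp [hd])) _ (by omega)

theorem main_eq (t : Int) (htnn : 0 ≤ t) :
    (if t ∈ TriangleNumberList then true else false)
      = decide (pvBsearch t 0 676 ≥ 1 ∧
          PySem.Int.floordiv (pvBsearch t 0 676 * (pvBsearch t 0 676 + 1)) 2 = t) := by
  have htri0 : pvTri 0 = 0 := by decide
  have hb := bsearch_spec t 0 676 (by omega) le_rfl (by omega) (Or.inl rfl)
  set r := pvBsearch t 0 676 with hr
  have hT : PySem.Int.floordiv (r * (r + 1)) 2 = pvTri r := rfl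
  rw [hT]
  by_cases hmem : t ∈ TriangleNumberList
  · rw [if_pos hmem]
    obtain ⟨i, hi1, hi2, hi3⟩ := (mem_TriangleNumberList t).mp hmem
    have hri : r = i := by
      have hle : r ≤ i := (tri_le_iff hb.1 (by omega)).mp (by rw [← hi3]; exact hb.2.2.1)
      rcases hb.2.2.2 with hcase | hcase
      · omega
      · have : i < r + 1 := by
          by_contra hcon
          have : pvTri (r + 1) ≤ pvTri i := (tri_le_iff (by omega) (by omega)).mpr (by omega)
          omega
        omega
    symm
    rw [decide_eq_true_iff]
    exact ⟨by omega, by rw [hri, ← hi3]⟩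
  · rw [if_neg hmem]
    symm
    rw [decide_eq_false_iff_not]
    rintro ⟨hr1, hr2⟩
    exact hmem ((mem_TriangleNumberList t).mpr ⟨r, hr1, by omega, hr2.symm⟩)

-- ===== VERDICT (by name: the statement is the Claim_ definition above) =====
theorem GetAlphaSum_spec : Claim_equal_GetAlphaSum := by
  intro n _hdom hpre
  have hp := pre_chars n hpre
  unfold Spec_GetAlphaSum GetAlphaSum GetAlphaSum_alt
  rw [sumIdx_eq n.toList hp 0]
  exact main_eq _ (sum_nonneg n.toList hp 0 le_rfl)
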